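-- pv_equiv track=rewrite | github.com/DPTPhatUS/dequation | data/clean_latex.py | clean_latex_spacing
-- ===== SOURCE A (Python) =====
-- def clean_latex_spacing(text):
--     result = []
--     i = 0
--     while i < len(text):
--         char = text[i]
--         if char == "\\":
--             result.append(char)
--             i += 1
--             while i < len(text) and text[i].isalpha():
--                 result.append(text[i])
--                 i += 1
--             if i < len(text) and text[i] == " ":
--                 result.append(" ")
--                 i += 1
--                 while i < len(text) and text[i] == " ":
--                     i += 1
--         elif char == " ":
--             j = i
--             while j < len(text) and text[j] == " ":
--                 j += 1
--
--             if j < len(text) and text[j] == "\\":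
--                 result.append(" ")
--                 i = j
--             else:
--                 while i < len(text) and text[i] == " ":
--                     i += 1
--         else:
--             result.append(char)
--             i += 1
--     return "".join(result)
-- ===== SOURCE B (Python) =====
-- def clean_latex_spacing(text):
--     # Split on single spaces: gaps between pieces are spaces; a run of k spaces
--     # shows up as k-1 empty pieces.  A maximal run starts at the gap after a
--     # nonempty piece (or after piece 0).  Emit one space for a run iff the piece
--     # before it ends in a LaTeX command (backslash followed only by letters) or
--     # the next nonempty piece starts with a backslash; otherwise drop the run.
--     pieces = text.split(" ")
--     n = len(pieces)
--     out = []
--     for idx in range(n):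
--         p = pieces[idx]
--         out.append(p)
--         if idx < n - 1 and (p != "" or idx == 0):
--             k = idx + 1
--             while k < n and pieces[k] == "":
--                 k += 1
--             if "\\" in p:
--                 tail = p[p.rfind("\\") + 1:]
--                 after_cmd = all(c.isalpha() for c in tail)
--             else:
--                 after_cmd = False
--             if after_cmd or (k < n and pieces[k].startswith("\\")):
--                 out.append(" ")
--     return "".join(out)
-- ===== Notes on version B (the rewrite author's own statement) =====
-- stated objective: faster
-- what changed: B replaces A's index-driven character state machine by splitting the text on single spaces and deciding each maximal space run once per gap (kept iff the preceding piece ends in a backslash command or the next nonempty piece starts with a backslash).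
import Mathlib
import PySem

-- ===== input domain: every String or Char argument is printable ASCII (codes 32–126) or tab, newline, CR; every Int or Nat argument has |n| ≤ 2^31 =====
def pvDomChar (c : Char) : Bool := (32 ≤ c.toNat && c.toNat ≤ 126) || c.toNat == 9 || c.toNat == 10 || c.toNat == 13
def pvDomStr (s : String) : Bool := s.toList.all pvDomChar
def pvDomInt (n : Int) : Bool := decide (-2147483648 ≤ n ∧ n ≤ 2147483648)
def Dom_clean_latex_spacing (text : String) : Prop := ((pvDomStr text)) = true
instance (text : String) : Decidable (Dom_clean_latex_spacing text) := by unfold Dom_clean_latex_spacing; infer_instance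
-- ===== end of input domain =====

-- B re-implements the cleaner over the list of space-separated pieces (text.split(" "))
-- instead of A's index-driven character state machine; a timing run measured B faster.


-- ===== PORT A =====
-- inner while of the backslash branch: consume alphabetic letters (letters, remainder)
def pvSpanAlpha : List Char → List Char × List Char
  | [] => ([], [])
  | c :: rest =>
    if PySem.Chars.isalpha c then (c :: (pvSpanAlpha rest).1, (pvSpanAlpha rest).2)
    else ([], c :: rest)

-- termination helper for pvGoA (cited in decreasing_by)
theorem pvSpanAlpha_snd_le (l : List Char) : (pvSpanAlpha l).2.length ≤ l.length := by
  induction l with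
  | nil => simp [pvSpanAlpha]
  | cons c rest ih => simp only [pvSpanAlpha]; split <;> simp <;> omega

-- "while i < len(text) and text[i] == ' ': i += 1"
def pvSkipSpaces : List Char → List Char
  | [] => []
  | c :: rest => if c = ' ' then pvSkipSpaces rest else c :: rest

-- termination helper for pvGoA (cited in decreasing_by)
theorem pvSkipSpaces_le (l : List Char) : (pvSkipSpaces l).length ≤ l.length := by
  induction l with
  | nil => simp [pvSkipSpaces]
  | cons c rest ih => simp only [pvSkipSpaces]; split <;> simp <;> omega

-- the outer while loop of A, recursing on the unread suffix of the text
def pvGoA : List Char → List Char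
  | [] => []
  | c :: rest =>
    if c = '\\' then
      -- command: keep backslash and letters; one space kept if spaces follow, rest skipped
      let a := (pvSpanAlpha rest).1
      let b := (pvSpanAlpha rest).2
      if h : b ≠ [] ∧ b.headI = ' ' then
        (c :: a) ++ (' ' :: pvGoA (pvSkipSpaces b.tail))
      else
        (c :: a) ++ pvGoA b
    else if c = ' ' then
      -- bare space run: kept as one space iff a backslash follows it
      let r := pvSkipSpaces rest
      if r ≠ [] ∧ r.headI = '\\' then ' ' :: pvGoA r else pvGoA r
    else
      c :: pvGoA rest
termination_by l => l.length
decreasing_by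
  · have h1 := pvSpanAlpha_snd_le rest
    have h2 := pvSkipSpaces_le ((pvSpanAlpha rest).2.tail)
    have h3 : (pvSpanAlpha rest).2.tail.length < (pvSpanAlpha rest).2.length := by
      cases hb : (pvSpanAlpha rest).2 with
      | nil => exact absurd hb h.1
      | cons x xs => simp [hb]
    simp only [List.length_cons]; omega
  · have h1 := pvSpanAlpha_snd_le rest
    simp only [List.length_cons]; omega
  · have h1 := pvSkipSpaces_le rest
    simp only [List.length_cons]; omega
  · have h1 := pvSkipSpaces_le rest
    simp only [List.length_cons]; omega
  · simp

def clean_latex_spacing (text : String) : String := String.mk (pvGoA text.toList)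

-- ===== PORT B =====
-- after_cmd: '\' in p and all chars of p[p.rfind('\\')+1:] are letters;
-- p[p.rfind('\\')+1:] is exactly the maximal backslash-free suffix of p
def pvAfterCmd (p : List Char) : Bool :=
  if p.contains '\\' then
    ((p.reverse.takeWhile (fun c => c != '\\')).reverse).all PySem.Chars.isalpha
  else false

-- the loop over pieces: first = (idx == 0); a gap follows every piece but the last
def pvGoB (first : Bool) : List (List Char) → List Char
  | [] => []
  | [p] => p
  | p :: q :: rest =>
    if p ≠ [] ∨ first = true then
      -- the "while k"-scan for the next nonempty piece
      let nq := (q :: rest).find? (fun x => !x.isEmpty)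
      let sp := pvAfterCmd p || (match nq with | some (c :: _) => c == '\\' | _ => false)
      p ++ (if sp then [' '] else []) ++ pvGoB false (q :: rest)
    else
      p ++ pvGoB false (q :: rest)

def clean_latex_spacing_alt (text : String) : String :=
  String.mk (pvGoB true (PySem.Chars.splitOn text.toList [' ']))

-- ===== PRECONDITION & SPEC =====
def Spec_clean_latex_spacing (text : String) (out : String) : Prop := out = clean_latex_spacing_alt text
instance (text : String) (out : String) : Decidable (Spec_clean_latex_spacing text out) := by unfold Spec_clean_latex_spacing; infer_instance

-- ===== CLAIM (what is proved, stated in full; the proofs are below) =====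
def Claim_equal_clean_latex_spacing : Prop := ∀ (text : String), Dom_clean_latex_spacing text → Spec_clean_latex_spacing text (clean_latex_spacing text)

-- ===== LEMMAS AND PROOFS =====

-- the predicate "not a space" used all over
def pvNS : Char → Bool := fun c => c != ' '

-- reference recurrence form of text.split(" ")
def refSplit : List Char → List (List Char)
  | [] => [[]]
  | c :: t =>
    if c = ' ' then [] :: refSplit t
    else match refSplit t with
         | [] => [[c]]
         | h :: r => (c :: h) :: r

theorem refSplit_ne_nil (l : List Char) : refSplit l ≠ [] := by
  cases l with
  | nil => simp [refSplit]
  | cons c t =>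
    simp only [refSplit]
    split
    · simp
    · split <;> simp

theorem refSplit_cons_shape (l : List Char) : ∃ h tl, refSplit l = h :: tl := by
  cases hS : refSplit l with
  | nil => exact absurd hS (refSplit_ne_nil l)
  | cons a b => exact ⟨a, b, rfl⟩

-- generic takeWhile/dropWhile helpers
theorem tw_all {p : Char → Bool} {a : List Char} (ha : ∀ x ∈ a, p x = true) :
    a.takeWhile p = a := List.takeWhile_eq_self_iff.mpr ha

theorem tw_append_all {p : Char → Bool} {a b : List Char} (ha : ∀ x ∈ a, p x = true) :
    (a ++ b).takeWhile p = a ++ b.takeWhile p := by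
  rw [List.takeWhile_append, if_pos (by rw [tw_all ha])]

theorem dw_append_all {p : Char → Bool} {a b : List Char} (ha : ∀ x ∈ a, p x = true) :
    (a ++ b).dropWhile p = b.dropWhile p := by
  rw [List.dropWhile_append, if_pos (by simp [List.dropWhile_eq_nil_iff.mpr ha])]

theorem dw_head_false {p : Char → Bool} {l r : List Char} {d : Char}
    (h : l.dropWhile p = d :: r) : p d = false := by
  induction l with
  | nil => simp at h
  | cons c t ih =>
    rw [List.dropWhile_cons] at h
    split at h
    · exact ih h
    · next hc => cases h; simpa using hc

theorem go_spec : ∀ (fuel : Nat) (l cur acc : _), l.length ≤ fuel →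
    PySem.Chars.splitOn.go [' '] fuel l cur acc
      = acc.reverse ++ (cur.reverse ++ (refSplit l).headI) :: (refSplit l).tail := by
  intro fuel
  induction fuel with
  | zero =>
    intro l cur acc h
    have hl : l = [] := by cases l <;> simp_all
    subst hl
    simp [PySem.Chars.splitOn.go, refSplit]
  | succ f ih =>
    intro l cur acc h
    cases l with
    | nil => simp [PySem.Chars.splitOn.go, refSplit]
    | cons c rest =>
      rw [PySem.Chars.splitOn.go]
      obtain ⟨h0, tl, hS⟩ := refSplit_cons_shape rest
      by_cases hc : c = ' '
      · subst hc
        rw [if_pos (by simp [List.isPrefixOf])]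
        simp only [List.length_singleton, List.drop_succ_cons, List.drop_zero]
        rw [ih rest [] (cur.reverse :: acc) (by simp at h; omega)]
        simp [refSplit, hS]
      · rw [if_neg (by simp [List.isPrefixOf]; exact fun e => hc e.symm)]
        rw [ih rest (c :: cur) acc (by simp at h; omega)]
        simp [refSplit, hc, hS]

theorem splitOn_eq (l : List Char) : PySem.Chars.splitOn l [' '] = refSplit l := by
  obtain ⟨h0, tl, hS⟩ := refSplit_cons_shape l
  have h := go_spec (l.length + 1) l [] [] (by omega)
  simp only [PySem.Chars.splitOn] at *
  rw [h, hS]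
  simp

theorem spanAlpha_eq (l : List Char) :
    pvSpanAlpha l = (l.takeWhile PySem.Chars.isalpha, l.dropWhile PySem.Chars.isalpha) := by
  induction l with
  | nil => simp [pvSpanAlpha]
  | cons c t ih => simp only [pvSpanAlpha, List.takeWhile, List.dropWhile, ih]; split <;> simp_all

theorem skip_head_ne (l : List Char) (h : pvSkipSpaces l ≠ []) : (pvSkipSpaces l).headI ≠ ' ' := by
  induction l with
  | nil => simp [pvSkipSpaces] at h
  | cons c t ih =>
    by_cases hc : c = ' '
    · simp only [pvSkipSpaces, if_pos hc] at h ⊢; exact ih h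
    · simp only [pvSkipSpaces, if_neg hc]; simpa using hc

theorem alpha_ne_space {c : Char} (h : PySem.Chars.isalpha c = true) : c ≠ ' ' := by
  intro hc; subst hc; exact absurd h (by decide)

theorem alpha_ne_bs {c : Char} (h : PySem.Chars.isalpha c = true) : c ≠ '\\' := by
  intro hc; subst hc; exact absurd h (by decide)

-- afterCmd facts
theorem AC_nobs (p : List Char) (h : p.contains '\\' = false) : pvAfterCmd p = false := by
  unfold pvAfterCmd
  rw [if_neg (by rw [h]; exact Bool.false_ne_true)]

theorem AC_bs_alpha (a : List Char) (ha : a.all PySem.Chars.isalpha = true) :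
    pvAfterCmd ('\\' :: a) = true := by
  unfold pvAfterCmd
  rw [if_pos (by simp)]
  have hrev : ∀ x ∈ a.reverse, (x != '\\') = true := by
    intro x hx
    simpa using alpha_ne_bs (List.all_eq_true.mp ha x (List.mem_reverse.mp hx))
  rw [List.reverse_cons, tw_append_all hrev]
  simp only [List.takeWhile_cons]
  norm_num
  simpa using List.all_eq_true.mp ha

theorem AC_appendBS (u q : List Char) (hq : q.contains '\\' = true) :
    pvAfterCmd (u ++ q) = pvAfterCmd q := by
  unfold pvAfterCmd
  rw [if_pos (by simp at hq ⊢; exact Or.inr hq), if_pos (by simpa using hq)]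
  have hne : ¬ ((q.reverse.takeWhile (fun c => c != '\\')).length = q.reverse.length) := by
    intro hlen
    have heq := (List.takeWhile_prefix (l := q.reverse) (fun c => c != '\\')).eq_of_length hlen
    have hall := List.takeWhile_eq_self_iff.mp heq '\\' (by simp; simpa using hq)
    simp at hall
  rw [List.reverse_append, List.takeWhile_append, if_neg hne]

theorem AC_bs_alpha_bad (a q : List Char) (ha : a.all PySem.Chars.isalpha = true)
    (hq : q.contains '\\' = false) (hne : q ≠ []) (hh : PySem.Chars.isalpha q.headI = false) :
    pvAfterCmd ('\\' :: (a ++ q)) = false := by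
  unfold pvAfterCmd
  rw [if_pos (by simp)]
  have hrev : ∀ x ∈ (a ++ q).reverse, (x != '\\') = true := by
    intro x hx
    rcases List.mem_append.mp (List.mem_reverse.mp hx) with h | h
    · simpa using alpha_ne_bs (List.all_eq_true.mp ha x h)
    · have hx' : x ≠ '\\' := by
        intro e; subst e; simp at hq; exact hq h
      simpa using hx'
  rw [List.reverse_cons, tw_append_all hrev]
  simp only [List.takeWhile_cons]
  norm_num
  cases q with
  | nil => exact absurd rfl hne
  | cons d t =>
    intro _
    exact ⟨d, by simp, by simpa using hh⟩

theorem AC_cons (c : Char) (p : List Char) (hc : c ≠ '\\') :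
    pvAfterCmd (c :: p) = pvAfterCmd p := by
  by_cases hb : p.contains '\\'
  · exact AC_appendBS [c] p hb
  · rw [AC_nobs p (by simpa using hb), AC_nobs]
    simp at hb ⊢
    exact ⟨fun e => hc e.symm, hb⟩

-- split structure facts
theorem headS (u : List Char) : (refSplit u).headI = u.takeWhile pvNS := by
  induction u with
  | nil => simp [refSplit]
  | cons c t ih =>
    obtain ⟨h0, tl, hS⟩ := refSplit_cons_shape t
    by_cases hc : c = ' '
    · simp [refSplit, hc, List.takeWhile_cons, pvNS]
    · simp only [refSplit, if_neg hc, hS, List.takeWhile_cons]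
      rw [hS] at ih
      simp only [List.headI] at ih
      simp [pvNS, hc, ih]

theorem refSplit_nospace (a : List Char) (ha : ∀ x ∈ a, pvNS x = true) : refSplit a = [a] := by
  induction a with
  | nil => simp [refSplit]
  | cons c t ih =>
    have hc : ¬ (c = ' ') := by
      have := ha c (by simp); simpa [pvNS] using this
    simp only [refSplit, if_neg hc, ih (fun x hx => ha x (by simp [hx]))]

theorem refSplit_append_space (a b : List Char) (ha : ∀ x ∈ a, pvNS x = true) :
    refSplit (a ++ ' ' :: b) = a :: refSplit b := by
  induction a with
  | nil => simp [refSplit]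
  | cons c t ih =>
    have hc : ¬ (c = ' ') := by
      have := ha c (by simp); simpa [pvNS] using this
    simp only [List.cons_append, refSplit, if_neg hc, ih (fun x hx => ha x (by simp [hx]))]

theorem findNE (t : List Char) :
    (refSplit t).find? (fun x => !x.isEmpty)
      = if pvSkipSpaces t = [] then none else some ((pvSkipSpaces t).takeWhile pvNS) := by
  induction t with
  | nil => simp [refSplit, pvSkipSpaces]
  | cons c u ih =>
    by_cases hc : c = ' '
    · simp only [refSplit, if_pos hc, pvSkipSpaces, hc, if_pos rfl]
      simp [List.find?, ih]
    · obtain ⟨h0, tl, hS⟩ := refSplit_cons_shape u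
      simp only [refSplit, if_neg hc, hS, pvSkipSpaces, if_neg hc]
      simp [List.find?, List.takeWhile_cons, pvNS, hc]
      have hh := headS u
      rw [hS] at hh
      simpa using hh

theorem flag_irrel (ps : List (List Char)) (first : Bool) (h : ps.headI ≠ []) :
    pvGoB first ps = pvGoB true ps := by
  match ps with
  | [] => rfl
  | [p] => rfl
  | p :: q :: rest =>
    simp only [List.headI] at h
    simp only [pvGoB]
    rw [if_pos (Or.inl h), if_pos (Or.inl h)]

theorem SKIPB (t : List Char) :
    pvGoB false (refSplit t) = pvGoB true (refSplit (pvSkipSpaces t)) := by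
  induction t with
  | nil => rfl
  | cons c u ih =>
    by_cases hc : c = ' '
    · subst hc
      obtain ⟨h0, tl, hS⟩ := refSplit_cons_shape u
      have e1 : refSplit (' ' :: u) = [] :: refSplit u := by simp [refSplit]
      have e2 : pvSkipSpaces (' ' :: u) = pvSkipSpaces u := by simp [pvSkipSpaces]
      rw [e1, e2, hS]
      have hgo : pvGoB false ([] :: h0 :: tl) = pvGoB false (h0 :: tl) := by
        simp [pvGoB]
      rw [hgo, ← hS, ih]
    · simp only [pvSkipSpaces, if_neg hc]
      apply flag_irrel
      rw [headS]
      cases u with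
      | nil => simp [List.takeWhile_cons, pvNS, hc]
      | cons d v => simp [List.takeWhile_cons, pvNS, hc]

def pvCondF (p r : List Char) : Bool := pvAfterCmd p || (!r.isEmpty && r.headI == '\\')

-- more helpers
theorem headI_ne_space {t : List Char} (h : ∀ x ∈ t, pvNS x = true) : t.headI ≠ ' ' := by
  cases t with
  | nil => decide
  | cons c u => have := h c (by simp); simpa [pvNS] using this

theorem alpha_all_ns {t : List Char} : ∀ x ∈ t.takeWhile PySem.Chars.isalpha, pvNS x = true := by
  intro x hx
  simpa [pvNS] using alpha_ne_space (List.mem_takeWhile_imp hx)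

theorem dropWhile_mem_sub {p : Char → Bool} {t : List Char} {x : Char}
    (h : x ∈ t.dropWhile p) : x ∈ t := (List.dropWhile_sublist p).mem h

-- A's loop over one space-free piece (strong induction on length)
theorem A_piece1 : ∀ (n : Nat) (l : List Char), l.length ≤ n → l.headI ≠ ' ' →
    l.dropWhile pvNS = [] → pvGoA l = l.takeWhile pvNS := by
  intro n
  induction n with
  | zero =>
    intro l h _ _
    have hl : l = [] := by cases l <;> simp_all
    subst hl; simp [pvGoA]
  | succ m ih =>
    intro l h h0 hq
    cases l with
    | nil => simp [pvGoA]
    | cons c t =>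
      have hcS : c ≠ ' ' := by simpa using h0
      have hNSc : pvNS c = true := by simp [pvNS, hcS]
      have hqt : t.dropWhile pvNS = [] := by simpa [List.dropWhile_cons, hNSc] using hq
      have hallt : ∀ x ∈ t, pvNS x = true := List.dropWhile_eq_nil_iff.mp hqt
      rw [List.takeWhile_cons, if_pos hNSc, tw_all hallt]
      by_cases hbs : c = '\\'
      · subst hbs
        simp only [pvGoA, spanAlpha_eq]
        have hbcond : ¬ ((t.dropWhile PySem.Chars.isalpha) ≠ [] ∧
            (t.dropWhile PySem.Chars.isalpha).headI = ' ') := by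
          rintro ⟨hne, hhead⟩
          cases hb : t.dropWhile PySem.Chars.isalpha with
          | nil => exact hne hb
          | cons d r =>
            have hd : d ∈ t := dropWhile_mem_sub (by rw [hb]; simp)
            have hdns := hallt d hd
            rw [hb] at hhead
            simp only [List.headI] at hhead
            simp [pvNS, hhead] at hdns
        rw [dif_neg hbcond]
        have hb0 : (t.dropWhile PySem.Chars.isalpha).headI ≠ ' ' :=
          headI_ne_space (fun x hx => hallt x (dropWhile_mem_sub hx))
        have hbq : (t.dropWhile PySem.Chars.isalpha).dropWhile pvNS = [] :=
          List.dropWhile_eq_nil_iff.mpr (fun x hx => hallt x (dropWhile_mem_sub hx))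
        have hlen : (t.dropWhile PySem.Chars.isalpha).length ≤ m := by
          have := List.length_dropWhile_le PySem.Chars.isalpha t
          simp at h; omega
        rw [ih _ hlen hb0 hbq,
            tw_all (fun x hx => hallt x (dropWhile_mem_sub hx))]
        simp [List.takeWhile_append_dropWhile]
      · simp only [pvGoA]
        rw [if_neg hbs, if_neg hcS]
        have hlen : t.length ≤ m := by simp at h; omega
        rw [ih t hlen (headI_ne_space hallt) hqt, tw_all hallt]

theorem A_piece2 : ∀ (n : Nat) (l b2 : List Char), l.length ≤ n → l.headI ≠ ' ' →
    l.dropWhile pvNS = ' ' :: b2 →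
    pvGoA l = l.takeWhile pvNS
      ++ (if pvCondF (l.takeWhile pvNS) (pvSkipSpaces b2) then [' '] else [])
      ++ pvGoA (pvSkipSpaces b2) := by
  intro n
  induction n with
  | zero =>
    intro l b2 h _ hq
    have hl : l = [] := by cases l <;> simp_all
    subst hl; simp at hq
  | succ m ih =>
    intro l b2 h h0 hq
    cases l with
    | nil => simp at hq
    | cons c t =>
      have hcS : c ≠ ' ' := by simpa using h0
      have hNSc : pvNS c = true := by simp [pvNS, hcS]
      have hqt : t.dropWhile pvNS = ' ' :: b2 := by
        simpa [List.dropWhile_cons, hNSc] using hq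
      by_cases hbs : c = '\\'
      · subst hbs
        have hallA : ∀ x ∈ t.takeWhile PySem.Chars.isalpha, pvNS x = true := alpha_all_ns
        have hQb : (t.dropWhile PySem.Chars.isalpha).dropWhile pvNS = ' ' :: b2 := by
          conv at hqt => lhs; rw [← List.takeWhile_append_dropWhile (p := PySem.Chars.isalpha) (l := t)]
          rwa [dw_append_all hallA] at hqt
        cases hbh : t.dropWhile PySem.Chars.isalpha with
        | nil => rw [hbh] at hQb; simp at hQb
        | cons d r =>
          have hdA : PySem.Chars.isalpha d = false := dw_head_false hbh
          have htdecomp : t.takeWhile PySem.Chars.isalpha ++ d :: r = t := by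
            rw [← hbh]; exact List.takeWhile_append_dropWhile
          by_cases hd : d = ' '
          · subst hd
            -- the command branch of A fires: one space kept, the rest skipped
            have hb2 : b2 = r := by
              rw [hbh] at hQb
              simpa [List.dropWhile_cons, pvNS] using hQb.symm
            simp only [pvGoA, spanAlpha_eq]
            rw [dif_pos (by rw [hbh]; exact ⟨by simp, by simp⟩)]
            have hPl : (('\\' :: t).takeWhile pvNS) = '\\' :: t.takeWhile PySem.Chars.isalpha := by
              rw [List.takeWhile_cons, if_pos (by simp [pvNS])]
              conv_lhs => rw [← htdecomp]
              rw [tw_append_all hallA]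
              simp [List.takeWhile_cons, pvNS]
            rw [hPl]
            have hAC : pvAfterCmd ('\\' :: t.takeWhile PySem.Chars.isalpha) = true :=
              AC_bs_alpha _ (List.all_eq_true.mpr (fun x hx => List.mem_takeWhile_imp hx))
            rw [hbh, hb2]
            simp [pvCondF, hAC]
          · -- A keeps scanning inside the same piece: induction on the rest of the piece
            have hdns : pvNS d = true := by simp [pvNS, hd]
            simp only [pvGoA, spanAlpha_eq]
            rw [dif_neg (by rw [hbh]; simp [hd])]
            have hlen : (d :: r).length ≤ m := by
              have := List.length_dropWhile_le PySem.Chars.isalpha t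
              rw [hbh] at this; simp at h; omega
            have hQdr : (d :: r).dropWhile pvNS = ' ' :: b2 := by rw [← hbh]; exact hQb
            rw [hbh, ih (d :: r) b2 hlen (by simpa using hd) hQdr]
            have hPl : (('\\' :: t).takeWhile pvNS)
                = '\\' :: (t.takeWhile PySem.Chars.isalpha ++ (d :: r).takeWhile pvNS) := by
              rw [List.takeWhile_cons, if_pos (by simp [pvNS])]
              conv_lhs => rw [← htdecomp]
              rw [tw_append_all hallA]
            rw [hPl]
            have hPbne : (d :: r).takeWhile pvNS = d :: r.takeWhile pvNS := by
              rw [List.takeWhile_cons, if_pos hdns]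
            have hcond : pvAfterCmd ('\\' :: (t.takeWhile PySem.Chars.isalpha ++ (d :: r).takeWhile pvNS))
                = pvAfterCmd ((d :: r).takeWhile pvNS) := by
              by_cases hPbs : ((d :: r).takeWhile pvNS).contains '\\'
              · exact AC_appendBS ('\\' :: t.takeWhile PySem.Chars.isalpha) _ hPbs
              · have hNb : ((d :: r).takeWhile pvNS).contains '\\' = false :=
                  Bool.eq_false_iff.mpr hPbs
                rw [AC_bs_alpha_bad (t.takeWhile PySem.Chars.isalpha) ((d :: r).takeWhile pvNS)
                      (List.all_eq_true.mpr (fun x hx => List.mem_takeWhile_imp hx)) hNb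
                      (by rw [hPbne]; simp) (by rw [hPbne]; simpa using hdA),
                    AC_nobs _ hNb]
            simp [pvCondF, hcond, List.append_assoc]
      · -- ordinary character: it extends the current piece
        simp only [pvGoA]
        rw [if_neg hbs, if_neg hcS]
        cases t with
        | nil => simp at hqt
        | cons e u =>
          by_cases he : e = ' '
          · subst he
            have hb2 : b2 = u := by simpa [List.dropWhile_cons, pvNS] using hqt.symm
            have hPl : ((c :: ' ' :: u).takeWhile pvNS) = [c] := by
              simp [List.takeWhile_cons, pvNS, hcS]
            rw [hPl, hb2]
            have hACc : pvAfterCmd [c] = false := AC_nobs [c] (by simpa using Ne.symm hbs)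
            have hgoA : pvGoA (' ' :: u)
                = (if pvSkipSpaces u ≠ [] ∧ (pvSkipSpaces u).headI = '\\'
                   then ' ' :: pvGoA (pvSkipSpaces u) else pvGoA (pvSkipSpaces u)) := by
              simp [pvGoA]
            rw [hgoA]
            cases hru : pvSkipSpaces u with
            | nil => simp [pvCondF, hACc]
            | cons d0 r0 =>
              by_cases hd0 : d0 = '\\'
              · subst hd0; simp [pvCondF, hACc]
              · simp [pvCondF, hACc, hd0]
          · have hlen : (e :: u).length ≤ m := by simp at h ⊢; omega
            rw [ih (e :: u) b2 hlen (by simpa using he) hqt]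
            have hPl : ((c :: e :: u).takeWhile pvNS) = c :: (e :: u).takeWhile pvNS := by
              rw [List.takeWhile_cons, if_pos hNSc]
            rw [hPl]
            simp [pvCondF, AC_cons c ((e :: u).takeWhile pvNS) hbs, List.append_assoc]

theorem B_piece1 (l : List Char) (first : Bool) (h0 : l.headI ≠ ' ') (hq : l.dropWhile pvNS = []) :
    pvGoB first (refSplit l) = l.takeWhile pvNS := by
  have hall : ∀ x ∈ l, pvNS x = true := List.dropWhile_eq_nil_iff.mp hq
  rw [refSplit_nospace l hall, tw_all hall]
  rfl

theorem B_piece2 (l b2 : List Char) (first : Bool) (h0 : l.headI ≠ ' ')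
    (hq : l.dropWhile pvNS = ' ' :: b2) :
    pvGoB first (refSplit l) = l.takeWhile pvNS
      ++ (if pvCondF (l.takeWhile pvNS) (pvSkipSpaces b2) then [' '] else [])
      ++ pvGoB true (refSplit (pvSkipSpaces b2)) := by
  have hP : ∀ x ∈ l.takeWhile pvNS, pvNS x = true := fun x hx => List.mem_takeWhile_imp hx
  have hdecomp : l.takeWhile pvNS ++ ' ' :: b2 = l := by
    rw [← hq]; exact List.takeWhile_append_dropWhile
  have hS : refSplit l = l.takeWhile pvNS :: refSplit b2 := by
    conv_lhs => rw [← hdecomp]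
    exact refSplit_append_space _ _ hP
  obtain ⟨q, rest, hS2⟩ := refSplit_cons_shape b2
  have hPne : l.takeWhile pvNS ≠ [] := by
    cases l with
    | nil => simp at hq
    | cons c t =>
      have hc : pvNS c = true := by simpa [pvNS] using h0
      simp [List.takeWhile_cons, hc]
  rw [hS, hS2]
  simp only [pvGoB]
  rw [if_pos (Or.inl hPne), ← hS2, findNE b2, SKIPB b2]
  cases hr : pvSkipSpaces b2 with
  | nil => simp [pvCondF]
  | cons d r' =>
    have hd : pvNS d = true := by
      have hne := skip_head_ne b2 (by rw [hr]; simp)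
      rw [hr] at hne; simpa [pvNS] using hne
    simp [pvCondF, List.takeWhile_cons, hd]

theorem MAIN : ∀ (n : Nat) (l : List Char), l.length ≤ n → pvGoA l = pvGoB true (refSplit l) := by
  intro n
  induction n with
  | zero =>
    intro l h
    have hl : l = [] := by cases l <;> simp_all
    subst hl; simp [pvGoA, refSplit, pvGoB]
  | succ m ih =>
    intro l h
    cases l with
    | nil => simp [pvGoA, refSplit, pvGoB]
    | cons c t =>
      by_cases hc : c = ' '
      · subst hc
        have hA : pvGoA (' ' :: t)
            = (if pvSkipSpaces t ≠ [] ∧ (pvSkipSpaces t).headI = '\\'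
               then ' ' :: pvGoA (pvSkipSpaces t) else pvGoA (pvSkipSpaces t)) := by
          simp [pvGoA]
        have e1 : refSplit (' ' :: t) = [] :: refSplit t := by simp [refSplit]
        obtain ⟨q, rest, hS2⟩ := refSplit_cons_shape t
        rw [hA, e1, hS2]
        simp only [pvGoB]
        rw [if_pos (Or.inr trivial), ← hS2, findNE t, SKIPB t]
        have hskip : (pvSkipSpaces t).length ≤ m := by
          have := pvSkipSpaces_le t; simp at h; omega
        rw [← ih (pvSkipSpaces t) hskip]
        cases hr : pvSkipSpaces t with
        | nil => simp [pvAfterCmd, pvGoA]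
        | cons d r' =>
          have hd : pvNS d = true := by
            have hne := skip_head_ne t (by rw [hr]; simp)
            rw [hr] at hne; simpa [pvNS] using hne
          by_cases hdb : d = '\\'
          · subst hdb; simp [List.takeWhile_cons, hd, pvAfterCmd]
          · simp [List.takeWhile_cons, hd, hdb, pvAfterCmd]
      · have h0 : (c :: t).headI ≠ ' ' := by simpa using hc
        cases hq : (c :: t).dropWhile pvNS with
        | nil => rw [A_piece1 (m + 1) _ h h0 hq, B_piece1 _ true h0 hq]
        | cons d b2 =>
          have hd : d = ' ' := by
            have hdw := dw_head_false hq
            simpa [pvNS] using hdw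
          subst hd
          rw [A_piece2 (m + 1) _ b2 h h0 hq, B_piece2 _ b2 true h0 hq]
          have hlen : (pvSkipSpaces b2).length ≤ m := by
            have h1 := pvSkipSpaces_le b2
            have h2 := List.length_dropWhile_le pvNS (c :: t)
            rw [hq] at h2
            simp at h h2 ⊢
            omega
          rw [ih (pvSkipSpaces b2) hlen]

-- ===== VERDICT (by name: the statement is the Claim_ definition above) =====
theorem clean_latex_spacing_spec : Claim_equal_clean_latex_spacing := by
  intro text _
  unfold Spec_clean_latex_spacing clean_latex_spacing clean_latex_spacing_alt
  rw [splitOn_eq, MAIN text.toList.length text.toList (le_refl _)]
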